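-- pv_equiv track=rewrite | github.com/AndrewLeontev/words_selection | words_generator.py | return_maximum
-- ===== SOURCE A (Python) =====
-- def return_sorted_words(words_main):
--     words_sorted = []
--     words_sorted = set(words_main)
--     return words_sorted
--
-- def return_maximum(words_main):
--     #Ищем 80 процентов от макс числа
--     max_number = 0
--     words_sorted = return_sorted_words(words_main)
--     for word in words_sorted:
--         count_in_main = words_main.count(word)
--         if count_in_main > max_number:
--             max_number = count_in_main
--
--     return max_number
-- ===== SOURCE B (Python) =====
-- def return_maximum(words_main):
--     counts = {}
--     best = 0
--     for word in words_main:
--         c = counts.get(word, 0) + 1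
--         counts[word] = c
--         if c > best:
--             best = c
--     return best
-- ===== Notes on version B (the rewrite author's own statement) =====
-- stated objective: faster
-- what changed: Replaces A's build-a-set-then-rescan (one full words_main.count scan per distinct word) with a single pass that increments a per-word counter in a dict and tracks the running maximum.
import Mathlib
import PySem

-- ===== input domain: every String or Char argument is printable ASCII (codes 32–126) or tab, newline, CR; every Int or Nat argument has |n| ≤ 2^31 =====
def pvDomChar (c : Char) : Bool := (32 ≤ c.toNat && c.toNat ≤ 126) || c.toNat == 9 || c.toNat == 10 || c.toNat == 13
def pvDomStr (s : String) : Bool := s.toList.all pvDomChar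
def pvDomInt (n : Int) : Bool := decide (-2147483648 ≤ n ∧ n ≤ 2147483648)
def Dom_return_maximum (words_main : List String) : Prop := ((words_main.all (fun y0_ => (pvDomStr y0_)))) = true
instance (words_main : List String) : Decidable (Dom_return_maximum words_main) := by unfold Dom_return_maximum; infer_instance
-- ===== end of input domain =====

-- B replaces A's set-then-rescan (one words_main.count scan per distinct word) with a single
-- one-pass counter dict tracking the running maximum (objective: faster).

-- ===== PORT A =====
-- A iterates over a Python set; the fold's result (a max of counts) does not depend on the
-- iteration order, so the first-insertion order of PySem.Set.ofList is exact here.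
def return_sorted_words (words_main : List String) : PySem.Set String :=
  PySem.Set.ofList words_main

def return_maximum (words_main : List String) : Int :=
  (return_sorted_words words_main).foldl
    (fun max_number word =>
      let count_in_main : Int := (PySem.List.count words_main word : Int)
      if count_in_main > max_number then count_in_main else max_number) 0

-- ===== PORT B =====
def return_maximum_alt (words_main : List String) : Int :=
  (words_main.foldl
    (fun (st : PySem.Dict String Int × Int) word =>
      let c := st.1.getD word 0 + 1
      (st.1.insert word c, if c > st.2 then c else st.2))
    (PySem.Dict.empty, 0)).2

-- ===== PRECONDITION & SPEC =====
def Spec_return_maximum (words_main : List String) (out : Int) : Prop := out = return_maximum_alt words_main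
instance (words_main : List String) (out : Int) : Decidable (Spec_return_maximum words_main out) := by unfold Spec_return_maximum; infer_instance

-- ===== CLAIM (what is proved, stated in full; the proofs are below) =====
def Claim_equal_return_maximum : Prop := ∀ (words_main : List String), Dom_return_maximum words_main → Spec_return_maximum words_main (return_maximum words_main)

-- ===== LEMMAS AND PROOFS =====

-- the running-max-of-f fold, with f the count in a fixed list
def pvMaxF (f : String → Int) (i : Int) (l : List String) : Int :=
  l.foldl (fun m x => if f x > m then f x else m) i

-- max over ALL occurrences of words_main of their counts (the common value of both ports)
def pvM (q : List String) : Int := pvMaxF (fun x => (PySem.List.count q x : Int)) 0 q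

theorem pvMaxF_spec (f : String → Int) (l : List String) (i : Int) :
    i ≤ pvMaxF f i l ∧ (∀ x ∈ l, f x ≤ pvMaxF f i l) ∧
      (pvMaxF f i l = i ∨ ∃ x ∈ l, pvMaxF f i l = f x) := by
  induction l generalizing i with
  | nil => simp [pvMaxF]
  | cons a t ih =>
    have h := ih (if f a > i then f a else i)
    refine ⟨?_, ?_, ?_⟩
    · exact le_trans (by split_ifs with h' <;> omega) h.1
    · intro x hx
      rcases List.mem_cons.mp hx with rfl | hx
      · exact le_trans (by split_ifs with h' <;> omega) h.1
      · exact h.2.1 x hx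
    · rcases h.2.2 with he | ⟨x, hx, he⟩
      · by_cases h' : f a > i
        · exact Or.inr ⟨a, List.mem_cons_self, by simpa [pvMaxF, h'] using he⟩
        · exact Or.inl (by simpa [pvMaxF, h'] using he)
      · exact Or.inr ⟨x, List.mem_cons_of_mem a hx, he⟩

theorem pvMaxF_congr_mem (f : String → Int) (l1 l2 : List String)
    (h : ∀ x, x ∈ l1 ↔ x ∈ l2) (i : Int) : pvMaxF f i l1 = pvMaxF f i l2 := by
  have s1 := pvMaxF_spec f l1 i
  have s2 := pvMaxF_spec f l2 i
  apply le_antisymm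
  · rcases s1.2.2 with he | ⟨x, hx, he⟩
    · rw [he]; exact s2.1
    · rw [he]; exact s2.2.1 x ((h x).mp hx)
  · rcases s2.2.2 with he | ⟨x, hx, he⟩
    · rw [he]; exact s1.1
    · rw [he]; exact s1.2.1 x ((h x).mpr hx)

theorem return_maximum_eq_pvM (ws : List String) : return_maximum ws = pvM ws := by
  unfold return_maximum return_sorted_words pvM
  exact pvMaxF_congr_mem _ _ _ (PySem.Set.mem_ofList ws) 0

-- count of v in q ++ [w]
theorem count_append_singleton (q : List String) (w v : String) :
    (PySem.List.count (q ++ [w]) v : Int)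
      = (PySem.List.count q v : Int) + (if v = w then 1 else 0) := by
  by_cases h : v = w
  · subst h; simp [PySem.List.count, List.count_append]
  · simp [PySem.List.count, List.count_append, List.count_cons, List.count_nil,
      beq_eq_false_iff_ne.mpr (Ne.symm h), h]

-- the step invariant: appending one word w updates the maximum to max with count(q++[w]) w
theorem pvM_append_singleton (q : List String) (w : String) :
    pvM (q ++ [w]) =
      if (PySem.List.count q w : Int) + 1 > pvM q then (PySem.List.count q w : Int) + 1
      else pvM q := by
  unfold pvM
  have hcq : (PySem.List.count (q ++ [w]) w : Int) = (PySem.List.count q w : Int) + 1 := by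
    rw [count_append_singleton]; simp
  have s1 := pvMaxF_spec (fun x => (PySem.List.count (q ++ [w]) x : Int)) (q ++ [w]) 0
  have s2 := pvMaxF_spec (fun x => (PySem.List.count q x : Int)) q 0
  have h0q : (0 : Int) ≤ pvMaxF (fun x => (PySem.List.count q x : Int)) 0 q := s2.1
  have hcle : (PySem.List.count q w : Int) + 1
      ≤ pvMaxF (fun x => (PySem.List.count (q ++ [w]) x : Int)) 0 (q ++ [w]) := by
    have h := s1.2.1 w (by simp)
    simpa [hcq] using h
  have hqle : pvMaxF (fun x => (PySem.List.count q x : Int)) 0 q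
      ≤ pvMaxF (fun x => (PySem.List.count (q ++ [w]) x : Int)) 0 (q ++ [w]) := by
    rcases s2.2.2 with he | ⟨x, hx, he⟩
    · rw [he]; exact s1.1
    · have hmono : (PySem.List.count q x : Int) ≤ (PySem.List.count (q ++ [w]) x : Int) := by
        rw [count_append_singleton]; split_ifs <;> omega
      have hx2 := s1.2.1 x (List.mem_append.mpr (Or.inl hx))
      rw [he]; exact le_trans hmono hx2
  apply le_antisymm
  · rcases s1.2.2 with he | ⟨x, hx, he⟩
    · rw [he]; split_ifs <;> omega
    · by_cases hxw : x = w
      · subst hxw; rw [he, hcq]; split_ifs <;> omega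
      · have hxq : x ∈ q := by
          rcases List.mem_append.mp hx with h | h
          · exact h
          · exact absurd (List.mem_singleton.mp h) hxw
        have heq : (PySem.List.count (q ++ [w]) x : Int) = (PySem.List.count q x : Int) := by
          rw [count_append_singleton]; simp [hxw]
        have hle := s2.2.1 x hxq
        rw [he, heq]; split_ifs <;> omega
  · split_ifs <;> assumption

-- B's loop invariant: starting from the counter dict of the processed prefix p and best = pvM p,
-- processing the rest l yields pvM (p ++ l)
theorem alt_loop (l : List String) : ∀ (p : List String),
    (l.foldl
      (fun (st : PySem.Dict String Int × Int) word =>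
        let c := st.1.getD word 0 + 1
        (st.1.insert word c, if c > st.2 then c else st.2))
      (p.foldl (fun d x => d.insert x (d.getD x 0 + 1)) PySem.Dict.empty, pvM p)).2
      = pvM (p ++ l) := by
  induction l with
  | nil => intro p; simp
  | cons w t ih =>
    intro p
    have hget : (p.foldl (fun d x => d.insert x (d.getD x 0 + 1))
        (PySem.Dict.empty : PySem.Dict String Int)).getD w 0 = (PySem.List.count p w : Int) := by
      rw [PySem.Dict.getD_foldl_insert_add_one]
      simp [PySem.List.count, PySem.Dict.empty, PySem.Dict.getD, PySem.Dict.get?]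
    have hdict : (p.foldl (fun d x => d.insert x (d.getD x 0 + 1))
          (PySem.Dict.empty : PySem.Dict String Int)).insert w
          ((PySem.List.count p w : Int) + 1)
        = (p ++ [w]).foldl (fun d x => d.insert x (d.getD x 0 + 1)) PySem.Dict.empty := by
      rw [List.foldl_append]
      simp only [List.foldl_cons, List.foldl_nil]
      rw [hget]
    simp only [List.foldl_cons]
    rw [hget, hdict, ← pvM_append_singleton p w]
    have h := ih (p ++ [w])
    rw [List.append_assoc] at h
    exact h

-- ===== VERDICT (by name: the statement is the Claim_ definition above) =====
theorem return_maximum_spec : Claim_equal_return_maximum := by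
  intro ws _
  unfold Spec_return_maximum
  rw [return_maximum_eq_pvM]
  have h := alt_loop ws []
  simp only [List.nil_append] at h
  rw [return_maximum_alt, ← h]
  rfl
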